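-- pv_equiv track=rewrite | github.com/Victeldo/advent_of_code_2025 | problem_2/solution.py | count_invalid
-- ===== SOURCE A (Python) =====
-- def count_invalid(start, end):
--     invalid_sum = 0
--
--     for i in range(start, end + 1):
--         string_i = str(i)
--         if len(string_i) % 2 == 0:
--             if string_i[len(string_i)//2:] == string_i[:len(string_i)//2]:
--                 invalid_sum += i
--     return invalid_sum
-- ===== SOURCE B (Python) =====
-- def count_invalid(start, end):
--     # Enumerate candidates n*(10**k + 1) per half-length k instead of scanning the whole range.
--     if end < 1:
--         return 0
--     total = 0
--     K = (len(str(end)) + 1) // 2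
--     for k in range(1, K + 1):
--         m = 10 ** k + 1
--         for n in range(10 ** (k - 1), 10 ** k):
--             v = n * m
--             if start <= v <= end:
--                 total += v
--     return total
-- ===== Notes on version B (the rewrite author's own statement) =====
-- stated objective: alternative
-- what changed: B enumerates the candidate numbers n*(10**k+1) for each half-length k and keeps those inside [start, end], instead of scanning every integer in the range and comparing the two string halves.
import Mathlib
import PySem

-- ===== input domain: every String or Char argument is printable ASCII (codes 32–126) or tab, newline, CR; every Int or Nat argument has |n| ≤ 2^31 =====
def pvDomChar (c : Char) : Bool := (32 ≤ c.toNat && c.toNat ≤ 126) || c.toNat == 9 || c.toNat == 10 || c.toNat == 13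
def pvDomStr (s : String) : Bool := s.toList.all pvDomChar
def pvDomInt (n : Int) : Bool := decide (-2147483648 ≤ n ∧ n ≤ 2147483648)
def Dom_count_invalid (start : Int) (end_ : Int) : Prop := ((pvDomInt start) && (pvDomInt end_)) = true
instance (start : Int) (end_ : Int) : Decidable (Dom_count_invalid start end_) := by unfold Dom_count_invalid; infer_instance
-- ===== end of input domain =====

-- B enumerates the candidate numbers n*(10^k+1) per half-length k and range-checks them, instead of scanning the whole range and comparing string halves.

-- ===== PORT A =====
def count_invalid (start : Int) (end_ : Int) : Int :=
  (PySem.List.pyRange start (end_ + 1) 1).foldl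
    (fun invalid_sum i =>
      let string_i := PySem.Int.toStr i
      if PySem.Int.mod (PySem.Str.len string_i) 2 == 0 then
        if PySem.Str.slice string_i (some (PySem.Int.floordiv (PySem.Str.len string_i) 2)) none
             == PySem.Str.slice string_i none (some (PySem.Int.floordiv (PySem.Str.len string_i) 2)) then
          invalid_sum + i
        else invalid_sum
      else invalid_sum) 0

-- ===== PORT B =====
-- '10 ** k' for k ≥ 0 is ported as '10 ^ k.toNat' (exact: every k in the ranges below is ≥ 0).
def count_invalid_alt (start : Int) (end_ : Int) : Int :=
  if end_ < 1 then 0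
  else
    let K := PySem.Int.floordiv (PySem.Str.len (PySem.Int.toStr end_) + 1) 2
    (PySem.List.pyRange 1 (K + 1) 1).foldl
      (fun total k =>
        let m : Int := 10 ^ k.toNat + 1
        (PySem.List.pyRange (10 ^ (k.toNat - 1)) (10 ^ k.toNat) 1).foldl
          (fun total n =>
            let v := n * m
            if start ≤ v ∧ v ≤ end_ then total + v else total)
          total)
      0

-- ===== PRECONDITION & SPEC =====
def Spec_count_invalid (start : Int) (end_ : Int) (out : Int) : Prop := out = count_invalid_alt start end_
instance (start : Int) (end_ : Int) (out : Int) : Decidable (Spec_count_invalid start end_ out) := by unfold Spec_count_invalid; infer_instance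

-- ===== CLAIM (what is proved, stated in full; the proofs are below) =====
def Claim_equal_count_invalid : Prop := ∀ (start : Int) (end_ : Int), Dom_count_invalid start end_ → Spec_count_invalid start end_ (count_invalid start end_)

-- ===== LEMMAS AND PROOFS =====


theorem pvToDigitsCore_eq : ∀ (fuel n : Nat) (ds : List Char), n < fuel →
    Nat.toDigitsCore 10 fuel n ds
      = (if n = 0 then ['0'] else ((Nat.digits 10 n).map Nat.digitChar).reverse) ++ ds := by
  intro fuel
  induction fuel with
  | zero => intro n ds h; omega
  | succ f ih =>
    intro n ds h
    by_cases h0 : n = 0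
    · subst h0; simp [Nat.toDigitsCore]; decide
    · by_cases h1 : n / 10 = 0
      · simp only [Nat.toDigitsCore, h1, if_pos, if_neg h0]
        rw [Nat.digits_def' (by norm_num : (1:ℕ) < 10) (show 0 < n by omega), h1]
        simp only [Nat.digits_zero, List.map_cons, List.map_nil, List.reverse_cons,
          List.reverse_nil, List.nil_append, List.cons_append]
      · have hrec : n / 10 < f := by
          have : n / 10 < n := Nat.div_lt_self (by omega) (by norm_num)
          omega
        simp only [Nat.toDigitsCore, h1, if_false]
        rw [ih (n / 10) _ hrec, if_neg h1]
        rw [Nat.digits_def' (by norm_num : (1:ℕ) < 10) (show 0 < n by omega), if_neg h0]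
        simp only [List.map_cons, List.reverse_cons, List.append_assoc, List.cons_append,
          List.nil_append]

theorem pvToDigits_eq (n : Nat) :
    Nat.toDigits 10 n = if n = 0 then ['0'] else ((Nat.digits 10 n).map Nat.digitChar).reverse := by
  rw [Nat.toDigits, pvToDigitsCore_eq (n+1) n [] (by omega), List.append_nil]

theorem pvDrop_digits (k : Nat) : ∀ m : Nat, (Nat.digits 10 m).drop k = Nat.digits 10 (m / 10 ^ k) := by
  induction k with
  | zero => intro m; simp
  | succ k ih =>
    intro m
    by_cases hm : m = 0
    · subst hm; simp
    · rw [Nat.digits_def' (by norm_num : (1:ℕ) < 10) (by omega), List.drop_succ_cons, ih (m / 10),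
        Nat.div_div_eq_div_mul, ← pow_succ']

theorem pvOfDigits_take (k : Nat) : ∀ m : Nat, Nat.ofDigits 10 ((Nat.digits 10 m).take k) = m % 10 ^ k := by
  induction k with
  | zero => intro m; simp [Nat.mod_one]
  | succ k ih =>
    intro m
    by_cases hm : m = 0
    · subst hm; simp
    · rw [Nat.digits_def' (by norm_num : (1:ℕ) < 10) (by omega), List.take_succ_cons,
        Nat.ofDigits_cons, ih (m / 10)]
      rw [pow_succ', Nat.mod_mul]

theorem pvLen_bounds (m : Nat) (hm : 0 < m) :
    10 ^ ((Nat.digits 10 m).length - 1) ≤ m ∧ m < 10 ^ (Nat.digits 10 m).length := by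
  refine ⟨?_, Nat.lt_base_pow_length_digits (by norm_num)⟩
  have h1 : 10 ^ (Nat.digits 10 m).length ≤ 10 * m := Nat.base_pow_length_digits_le 10 m (by norm_num) (by omega)
  have h2 : 1 ≤ (Nat.digits 10 m).length := by
    have hne : Nat.digits 10 m ≠ [] := (Nat.digits_ne_nil_iff_ne_zero (b := 10)).mpr (by omega)
    cases h : Nat.digits 10 m with
    | nil => exact absurd h hne
    | cons a l => simp

  have : 10 ^ ((Nat.digits 10 m).length - 1) * 10 = 10 ^ (Nat.digits 10 m).length := by
    rw [← pow_succ]; congr 1; omega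
  omega

theorem pvLen_eq (k n : Nat) (hk : 1 ≤ k) (h1 : 10 ^ (k-1) ≤ n) (h2 : n < 10 ^ k) :
    (Nat.digits 10 n).length = k := by
  have hn : 0 < n := lt_of_lt_of_le (pow_pos (by norm_num : (0:ℕ) < 10) _) h1
  have hb := pvLen_bounds n hn
  set L := (Nat.digits 10 n).length with hL
  rcases lt_trichotomy L k with h | h | h
  · have : 10 ^ L ≤ 10 ^ (k-1) := Nat.pow_le_pow_right (by norm_num) (by omega)
    omega
  · exact h
  · have : 10 ^ k ≤ 10 ^ (L-1) := Nat.pow_le_pow_right (by norm_num) (by omega)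
    omega
theorem pvDigitChar_ne_dash (d : Nat) : Nat.digitChar d ≠ '-' := by
  by_cases h : d < 16
  · interval_cases d <;> decide
  · unfold Nat.digitChar
    have h0 : ¬ d = 0 := by omega
    have h1 : ¬ d = 1 := by omega
    have h2 : ¬ d = 2 := by omega
    have h3 : ¬ d = 3 := by omega
    have h4 : ¬ d = 4 := by omega
    have h5 : ¬ d = 5 := by omega
    have h6 : ¬ d = 6 := by omega
    have h7 : ¬ d = 7 := by omega
    have h8 : ¬ d = 8 := by omega
    have h9 : ¬ d = 9 := by omega
    have h10 : ¬ d = 10 := by omega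
    have h11 : ¬ d = 11 := by omega
    have h12 : ¬ d = 12 := by omega
    have h13 : ¬ d = 13 := by omega
    have h14 : ¬ d = 14 := by omega
    have h15 : ¬ d = 15 := by omega
    simp only [h0, h1, h2, h3, h4, h5, h6, h7, h8, h9, h10, h11, h12, h13, h14, h15, if_false]
    decide
theorem pvDigitChar_inj (d1 d2 : Nat) (h1 : d1 < 10) (h2 : d2 < 10)
    (h : Nat.digitChar d1 = Nat.digitChar d2) : d1 = d2 := by
  interval_cases d1 <;> interval_cases d2 <;> first | rfl | exact absurd h (by decide)

theorem pvMap_digitChar_inj : ∀ (a b : List Nat), (∀ x ∈ a, x < 10) → (∀ x ∈ b, x < 10) →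
    a.map Nat.digitChar = b.map Nat.digitChar → a = b := by
  intro a
  induction a with
  | nil => intro b _ _ h; cases b <;> simp_all
  | cons x xs ih =>
    intro b ha hb h
    cases b with
    | nil => simp_all
    | cons y ys =>
      simp only [List.map_cons, List.cons.injEq] at h
      have hx := pvDigitChar_inj x y (ha x (by simp)) (hb y (by simp)) h.1
      have := ih ys (fun z hz => ha z (by simp [hz])) (fun z hz => hb z (by simp [hz])) h.2
      simp [hx, this]

def pvCond (i : Int) : Bool :=
  (PySem.Int.mod (PySem.Str.len (PySem.Int.toStr i)) 2 == 0) &&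
  (PySem.Str.slice (PySem.Int.toStr i) (some (PySem.Int.floordiv (PySem.Str.len (PySem.Int.toStr i)) 2)) none
   == PySem.Str.slice (PySem.Int.toStr i) none (some (PySem.Int.floordiv (PySem.Str.len (PySem.Int.toStr i)) 2)))

theorem pvCond_iff_chars (i : Int) :
    pvCond i = true ↔
      ((PySem.Int.toChars i).length % 2 = 0 ∧
       (PySem.Int.toChars i).drop ((PySem.Int.toChars i).length / 2)
         = (PySem.Int.toChars i).take ((PySem.Int.toChars i).length / 2)) := by
  have hlen : PySem.Str.len (PySem.Int.toStr i) = ((PySem.Int.toChars i).length : Int) := by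
    rw [PySem.Str.len_eq, PySem.Int.toList_toStr]
  constructor
  · intro h
    simp only [pvCond, Bool.and_eq_true, beq_iff_eq] at h
    obtain ⟨h1, h2⟩ := h
    rw [hlen] at h1 h2
    have hmod : (PySem.Int.toChars i).length % 2 = 0 := by
      have := PySem.Int.mod_natCast (PySem.Int.toChars i).length 2
      rw [show ((2:Nat):Int) = (2:Int) by norm_num] at this
      rw [this] at h1
      exact_mod_cast h1
    refine ⟨hmod, ?_⟩
    have hdiv : PySem.Int.floordiv ((PySem.Int.toChars i).length : Int) 2
        = (((PySem.Int.toChars i).length / 2 : Nat) : Int) := by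
      have := PySem.Int.floordiv_natCast (PySem.Int.toChars i).length 2
      rw [show ((2:Nat):Int) = (2:Int) by norm_num] at this
      exact this
    rw [hdiv] at h2
    have h2' := congrArg String.toList h2
    rw [PySem.Str.toList_slice, PySem.Str.toList_slice, PySem.Chars.slice_eq_listSlice,
      PySem.Chars.slice_eq_listSlice, PySem.Int.toList_toStr,
      PySem.List.slice_from_natCast, PySem.List.slice_to_natCast] at h2'
    exact h2'
  · intro ⟨h1, h2⟩
    simp only [pvCond, Bool.and_eq_true, beq_iff_eq]
    constructor
    · rw [hlen]
      have := PySem.Int.mod_natCast (PySem.Int.toChars i).length 2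
      rw [show ((2:Nat):Int) = (2:Int) by norm_num] at this
      rw [this]
      exact_mod_cast h1
    · apply String.toList_inj.mp
      rw [hlen]
      have hdiv : PySem.Int.floordiv ((PySem.Int.toChars i).length : Int) 2
          = (((PySem.Int.toChars i).length / 2 : Nat) : Int) := by
        have := PySem.Int.floordiv_natCast (PySem.Int.toChars i).length 2
        rw [show ((2:Nat):Int) = (2:Int) by norm_num] at this
        exact this
      rw [hdiv, PySem.Str.toList_slice, PySem.Str.toList_slice, PySem.Chars.slice_eq_listSlice,
        PySem.Chars.slice_eq_listSlice, PySem.Int.toList_toStr,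
        PySem.List.slice_from_natCast, PySem.List.slice_to_natCast]
      exact h2


theorem pvToChars_pos (i : Int) (h : 0 < i) :
    PySem.Int.toChars i = ((Nat.digits 10 i.toNat).map Nat.digitChar).reverse := by
  unfold PySem.Int.toChars
  rw [if_neg (by omega), pvToDigits_eq, if_neg (by omega)]

theorem pvMem_toDigits_ne_dash (m : Nat) (c : Char) (hc : c ∈ Nat.toDigits 10 m) : c ≠ '-' := by
  rw [pvToDigits_eq] at hc
  split at hc
  · simp at hc; subst hc; decide
  · rw [List.mem_reverse, List.mem_map] at hc
    obtain ⟨d, _, rfl⟩ := hc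
    exact pvDigitChar_ne_dash d

theorem pvToDigits_ne_nil (m : Nat) : Nat.toDigits 10 m ≠ [] := by
  rw [pvToDigits_eq]
  split
  · simp
  · simp [Nat.digits_ne_nil_iff_ne_zero, *]

theorem pvCond_pos_iff (i : Int) (hi : 0 < i) :
    pvCond i = true ↔ ∃ k n : Nat, 1 ≤ k ∧ 10 ^ (k-1) ≤ n ∧ n < 10 ^ k ∧
      i = (n : Int) * ((10:Int) ^ k + 1) ∧ (Nat.digits 10 i.toNat).length = 2 * k := by
  have hm : 0 < i.toNat := by omega
  set m := i.toNat with hmdef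
  have him : i = (m : Int) := by omega
  rw [pvCond_iff_chars, pvToChars_pos i hi]
  set ds := Nat.digits 10 m with hds
  have hL : (((ds.map Nat.digitChar).reverse : List Char)).length = ds.length := by simp
  have hdig : ∀ x ∈ ds, x < 10 := fun x hx => Nat.digits_lt_base (by norm_num) hx
  have hL1 : 1 ≤ ds.length := by
    have hne : ds ≠ [] := Nat.digits_ne_nil_iff_ne_zero.mpr (by omega)
    have := List.length_pos_of_ne_nil hne
    omega
  constructor
  · rintro ⟨h1, h2⟩
    rw [hL] at h1 h2
    set L := ds.length with hLdef
    set k := L / 2 with hk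
    have hL2k : L = 2 * k := by omega
    have hkk : L - k = k := by omega
    rw [List.drop_reverse, List.take_reverse, List.length_map, ← hLdef, hkk] at h2
    have h3 : ds.take k = ds.drop k := by
      apply pvMap_digitChar_inj _ _ (fun x hx => hdig x (List.mem_of_mem_take hx))
        (fun x hx => hdig x (List.mem_of_mem_drop hx))
      rw [← List.map_take, ← List.map_drop] at h2
      exact List.reverse_inj.mp h2
    have hdrop : ds.drop k = Nat.digits 10 (m / 10 ^ k) := pvDrop_digits k m
    set h := m / 10 ^ k with hh
    have hlenh : (Nat.digits 10 h).length = k := by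
      rw [← hdrop, List.length_drop, ← hLdef]; omega
    have hk1 : 1 ≤ k := by omega
    have hh0 : 0 < h := by
      rcases Nat.eq_zero_or_pos h with h0 | h0
      · rw [h0] at hlenh; simp at hlenh; omega
      · exact h0
    have hbounds := pvLen_bounds h hh0
    rw [hlenh] at hbounds
    have htake : Nat.ofDigits 10 (ds.take k) = m % 10 ^ k := pvOfDigits_take k m
    have hmod : m % 10 ^ k = h := by
      rw [← htake, h3, hdrop, Nat.ofDigits_digits]
    have hmeq : m = h * (10 ^ k + 1) := by
      have := Nat.div_add_mod m (10 ^ k)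
      rw [hmod] at this
      nlinarith [this]
    refine ⟨k, h, hk1, hbounds.1, hbounds.2, ?_, by omega⟩
    rw [him, hmeq]
    push_cast
    ring
  · rintro ⟨k, n, hk1, hn1, hn2, heq, hlen⟩
    have hlenn : (Nat.digits 10 n).length = k := pvLen_eq k n hk1 hn1 hn2
    have hmeq : m = n + 10 ^ k * n := by
      have h1 : i = ((n * (10 ^ k + 1) : Nat) : Int) := by rw [heq]; push_cast; ring
      have h2 : m = n * (10 ^ k + 1) := by omega
      rw [h2]; ring
    have happ : Nat.digits 10 n ++ Nat.digits 10 n = ds := by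
      rw [hds, hmeq, ← hlenn]
      exact Nat.digits_append_digits (by norm_num)
    have hLds : ds.length = 2 * k := by rw [← happ]; simp [hlenn]; omega
    have htake : ds.take k = Nat.digits 10 n := by
      rw [← happ, List.take_left' hlenn]
    have hdrop : ds.drop k = Nat.digits 10 n := by
      rw [← happ, List.drop_left' hlenn]
    constructor
    · rw [hL]; omega
    · rw [hL, hLds]
      have hkk : 2 * k - (2 * k / 2) = k := by omega
      rw [List.drop_reverse, List.take_reverse, List.length_map, hLds, hkk]
      rw [← List.map_take, ← List.map_drop, htake, hdrop]

theorem pvCond_iff (i : Int) :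
    pvCond i = true ↔ ∃ k n : Nat, 1 ≤ k ∧ 10 ^ (k-1) ≤ n ∧ n < 10 ^ k ∧
      i = (n : Int) * ((10:Int) ^ k + 1) ∧ (Nat.digits 10 i.toNat).length = 2 * k := by
  rcases lt_trichotomy i 0 with hneg | hzero | hpos
  · constructor
    · intro h
      exfalso
      rw [pvCond_iff_chars] at h
      obtain ⟨h1, h2⟩ := h
      have hcs : PySem.Int.toChars i = '-' :: Nat.toDigits 10 i.natAbs := by
        unfold PySem.Int.toChars
        rw [if_pos hneg]
      set t := Nat.toDigits 10 i.natAbs with ht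
      have htne : t ≠ [] := pvToDigits_ne_nil _
      have htlen : 1 ≤ t.length := by
        have := List.length_pos_of_ne_nil htne
        omega
      rw [hcs] at h1 h2
      simp only [List.length_cons] at h1 h2
      set L := t.length + 1 with hLdef
      have hk1 : 1 ≤ L / 2 := by omega
      have hdropeq : (('-' :: t).drop (L / 2)) = t.drop (L / 2 - 1) := by
        have : L / 2 = (L / 2 - 1) + 1 := by omega
        rw [this, List.drop_succ_cons]
        simp
      have htakeeq : (('-' :: t).take (L / 2)) = '-' :: t.take (L / 2 - 1) := by
        have : L / 2 = (L / 2 - 1) + 1 := by omega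
        rw [this, List.take_succ_cons]
        simp
      rw [hdropeq, htakeeq] at h2
      have : '-' ∈ t.drop (L / 2 - 1) := by rw [h2]; exact List.mem_cons_self ..
      exact pvMem_toDigits_ne_dash _ _ (List.drop_subset _ _ this) rfl
    · rintro ⟨k, n, hk1, hn1, hn2, heq, -⟩
      exfalso
      have h10 : (0:Int) < (10:Int) ^ k := pow_pos (by norm_num) k
      have hn0 : (1:Nat) ≤ n := le_trans (Nat.one_le_pow _ _ (by norm_num)) hn1
      nlinarith [heq, hneg]
  · subst hzero
    constructor
    · intro h; exact absurd h (by decide)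
    · rintro ⟨k, n, hk1, hn1, hn2, heq, -⟩
      exfalso
      have hn0 : (1:Nat) ≤ n := le_trans (Nat.one_le_pow _ _ (by norm_num)) hn1
      have h10 : (0:Int) < (10:Int) ^ k + 1 := by positivity
      nlinarith [heq]
  · exact pvCond_pos_iff i hpos

theorem pvDigits_prod (k n : Nat) (hk : 1 ≤ k) (h1 : 10 ^ (k-1) ≤ n) (h2 : n < 10 ^ k) :
    Nat.digits 10 (n * (10 ^ k + 1)) = Nat.digits 10 n ++ Nat.digits 10 n := by
  have hlenn := pvLen_eq k n hk h1 h2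
  have h : n * (10 ^ k + 1) = n + 10 ^ k * n := by ring
  rw [h, ← hlenn]
  exact (Nat.digits_append_digits (by norm_num)).symm

theorem pvLen_prod (k n : Nat) (hk : 1 ≤ k) (h1 : 10 ^ (k-1) ≤ n) (h2 : n < 10 ^ k) :
    (Nat.digits 10 (n * (10 ^ k + 1))).length = 2 * k := by
  rw [pvDigits_prod k n hk h1 h2, List.length_append, pvLen_eq k n hk h1 h2]
  omega

def pvG (i : Int) : Int := (((Nat.digits 10 i.toNat).length / 2 : Nat) : Int)

def pvK (end_ : Int) : Int := PySem.Int.floordiv (PySem.Str.len (PySem.Int.toStr end_) + 1) 2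

noncomputable def pvInner (start end_ k : Int) : Int :=
  ∑ n ∈ Finset.Icc ((10:Int) ^ (k.toNat - 1)) ((10:Int) ^ k.toNat - 1),
    (if start ≤ n * ((10:Int) ^ k.toNat + 1) ∧ n * ((10:Int) ^ k.toNat + 1) ≤ end_
     then n * ((10:Int) ^ k.toNat + 1) else 0)

theorem pvToFinset_pyRange (a b : Int) : (PySem.List.pyRange a b 1).toFinset = Finset.Icc a (b-1) := by
  ext x
  rw [List.mem_toFinset, PySem.List.mem_pyRange_one, Finset.mem_Icc]
  omega

theorem pvFoldl_add_Icc (a b init : Int) (f : Int → Int) :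
    (PySem.List.pyRange a b 1).foldl (fun acc i => acc + f i) init
      = init + ∑ i ∈ Finset.Icc a (b-1), f i := by
  rw [PySem.List.foldl_add, ← List.sum_toFinset f (PySem.List.nodup_pyRange_one a b),
    pvToFinset_pyRange]

theorem pvA_eq_sum (start end_ : Int) :
    count_invalid start end_ = ∑ i ∈ Finset.Icc start end_, (if pvCond i then i else 0) := by
  unfold count_invalid
  have hb : (fun (invalid_sum : Int) (i : Int) =>
      let string_i := PySem.Int.toStr i
      if PySem.Int.mod (PySem.Str.len string_i) 2 == 0 then
        if PySem.Str.slice string_i (some (PySem.Int.floordiv (PySem.Str.len string_i) 2)) none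
             == PySem.Str.slice string_i none (some (PySem.Int.floordiv (PySem.Str.len string_i) 2)) then
          invalid_sum + i
        else invalid_sum
      else invalid_sum)
      = fun acc i => acc + (if pvCond i then i else 0) := by
    funext acc i
    by_cases h1 : (PySem.Int.mod (PySem.Str.len (PySem.Int.toStr i)) 2 == 0) = true
    · by_cases h2 : (PySem.Str.slice (PySem.Int.toStr i) (some (PySem.Int.floordiv (PySem.Str.len (PySem.Int.toStr i)) 2)) none
             == PySem.Str.slice (PySem.Int.toStr i) none (some (PySem.Int.floordiv (PySem.Str.len (PySem.Int.toStr i)) 2))) = true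
      · rw [if_pos h1, if_pos h2, if_pos (show pvCond i = true by unfold pvCond; rw [h1, h2]; rfl)]
      · rw [if_pos h1, if_neg h2, if_neg (show ¬ pvCond i = true by
          unfold pvCond
          rw [Bool.and_eq_true]
          exact fun hc => h2 hc.2), add_zero]
    · rw [if_neg h1, if_neg (show ¬ pvCond i = true by
        unfold pvCond
        rw [Bool.and_eq_true]
        exact fun hc => h1 hc.1), add_zero]
  rw [hb, pvFoldl_add_Icc]
  have h : end_ + 1 - 1 = end_ := by ring
  rw [h, zero_add]

theorem pvB_eq_sum (start end_ : Int) (h : ¬ end_ < 1) :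
    count_invalid_alt start end_ = ∑ k ∈ Finset.Icc (1:Int) (pvK end_), pvInner start end_ k := by
  unfold count_invalid_alt
  rw [if_neg h]
  have hb : (fun (total : Int) (k : Int) =>
      let m : Int := 10 ^ k.toNat + 1
      (PySem.List.pyRange (10 ^ (k.toNat - 1)) (10 ^ k.toNat) 1).foldl
        (fun total n =>
          let v := n * m
          if start ≤ v ∧ v ≤ end_ then total + v else total)
        total)
      = fun total k => total + pvInner start end_ k := by
    funext total k
    have hinner : (fun (total : Int) (n : Int) =>
        if start ≤ n * ((10:Int) ^ k.toNat + 1) ∧ n * ((10:Int) ^ k.toNat + 1) ≤ end_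
        then total + n * ((10:Int) ^ k.toNat + 1) else total)
        = fun acc n => acc + (if start ≤ n * ((10:Int) ^ k.toNat + 1) ∧ n * ((10:Int) ^ k.toNat + 1) ≤ end_
            then n * ((10:Int) ^ k.toNat + 1) else 0) := by
      funext acc n
      by_cases hc : start ≤ n * ((10:Int) ^ k.toNat + 1) ∧ n * ((10:Int) ^ k.toNat + 1) ≤ end_
      <;> simp [hc]
    show (PySem.List.pyRange (10 ^ (k.toNat - 1)) (10 ^ k.toNat) 1).foldl
        (fun total n =>
          if start ≤ n * ((10:Int) ^ k.toNat + 1) ∧ n * ((10:Int) ^ k.toNat + 1) ≤ end_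
          then total + n * ((10:Int) ^ k.toNat + 1) else total) total = _
    rw [hinner, pvFoldl_add_Icc]
    rfl
  rw [hb, pvFoldl_add_Icc, zero_add]
  have h2 : pvK end_ + 1 - 1 = pvK end_ := by ring
  rw [pvK] at h2 ⊢
  rw [h2]

theorem pvInner_eq_fiber (start end_ k : Int) (hk : 1 ≤ k) :
    pvInner start end_ k
      = ∑ i ∈ ((Finset.Icc start end_).filter (fun i => pvCond i = true)).filter
          (fun i => pvG i = k), i := by
  set K := k.toNat with hK
  have hkK : k = (K : Int) := by omega
  have hK1 : 1 ≤ K := by omega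
  have hMpos : 0 < (10:Int) ^ K + 1 := by positivity
  have cast10a : ((10:Int) ^ (K - 1)) = ((10 ^ (K - 1) : Nat) : Int) := by push_cast; ring
  have cast10b : ((10:Int) ^ K) = ((10 ^ K : Nat) : Int) := by push_cast; ring
  have himg := Finset.sum_image (f := fun i : Int => i) (g := fun n : Int => n * ((10:Int) ^ K + 1))
    (s := Finset.filter (fun n => start ≤ n * ((10:Int) ^ K + 1) ∧ n * ((10:Int) ^ K + 1) ≤ end_)
      (Finset.Icc ((10:Int) ^ (K - 1)) ((10:Int) ^ K - 1)))
    (fun a _ b _ hab => mul_right_cancel₀ (by positivity) hab)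
  rw [pvInner, ← Finset.sum_filter, ← himg]
  congr 1
  ext i
  simp only [Finset.mem_image, Finset.mem_filter, Finset.mem_Icc]
  constructor
  · rintro ⟨n, ⟨⟨hlo, hhi⟩, hr1, hr2⟩, rfl⟩
    have hnpos : 0 < n := lt_of_lt_of_le (by positivity) hlo
    set nn := n.toNat with hnn
    have hncast : n = (nn : Int) := by omega
    have hnn1 : 10 ^ (K - 1) ≤ nn := by
      rw [hncast, cast10a] at hlo
      exact_mod_cast hlo
    have hnn2 : nn < 10 ^ K := by
      rw [hncast, cast10b] at hhi
      have : (nn : Int) < ((10 ^ K : Nat) : Int) := by omega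
      exact_mod_cast this
    have hprod : n * ((10:Int) ^ K + 1) = ((nn * (10 ^ K + 1) : Nat) : Int) := by
      rw [hncast, cast10b]; push_cast; ring
    have hcond : pvCond (n * ((10:Int) ^ K + 1)) = true := by
      rw [pvCond_iff (n * ((10:Int) ^ K + 1))]
      refine ⟨K, nn, hK1, hnn1, hnn2, by rw [hncast], ?_⟩
      rw [hprod, Int.toNat_natCast]
      exact pvLen_prod K nn hK1 hnn1 hnn2
    have hg : pvG (n * ((10:Int) ^ K + 1)) = k := by
      rw [pvG, hprod, Int.toNat_natCast, pvLen_prod K nn hK1 hnn1 hnn2, hkK]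
      congr 1
      omega
    exact ⟨⟨⟨hr1, hr2⟩, hcond⟩, hg⟩
  · rintro ⟨⟨⟨hs, he⟩, hcond⟩, hg⟩
    obtain ⟨k', n', hk1', h1', h2', heq, hlen⟩ := (pvCond_iff i).mp hcond
    have hgk : pvG i = (k' : Int) := by
      rw [pvG, hlen]
      congr 1
      omega
    have hkk : k' = K := by
      rw [hgk, hkK] at hg
      exact_mod_cast hg
    subst hkk
    refine ⟨(n' : Int), ⟨⟨?_, ?_⟩, ?_, ?_⟩, ?_⟩
    · rw [cast10a]; exact_mod_cast h1'
    · rw [cast10b]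
      have : (n' : Int) < ((10 ^ K : Nat) : Int) := by exact_mod_cast h2'
      omega
    · rw [← heq]; exact hs
    · rw [← heq]; exact he
    · rw [← heq]


theorem pvK_eq (end_ : Int) (h : ¬ end_ < 1) :
    pvK end_ = ((((Nat.digits 10 end_.toNat).length + 1) / 2 : Nat) : Int) := by
  have hlen : PySem.Str.len (PySem.Int.toStr end_) = ((Nat.digits 10 end_.toNat).length : Int) := by
    rw [PySem.Str.len_eq, PySem.Int.toList_toStr, pvToChars_pos end_ (by omega)]
    simp
  rw [pvK, hlen]
  have hcast : ((Nat.digits 10 end_.toNat).length : Int) + 1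
      = (((Nat.digits 10 end_.toNat).length + 1 : Nat) : Int) := by push_cast; ring
  rw [hcast]
  have := PySem.Int.floordiv_natCast ((Nat.digits 10 end_.toNat).length + 1) 2
  rw [show ((2:Nat):Int) = (2:Int) by norm_num] at this
  exact this

theorem pvMapsTo (start end_ : Int) (h : ¬ end_ < 1) :
    ∀ i ∈ (Finset.Icc start end_).filter (fun i => pvCond i = true),
      pvG i ∈ Finset.Icc (1:Int) (pvK end_) := by
  intro i hi
  rw [Finset.mem_filter, Finset.mem_Icc] at hi
  obtain ⟨⟨hs, he⟩, hcond⟩ := hi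
  obtain ⟨k, n, hk1, h1, h2, heq, hlen⟩ := (pvCond_iff i).mp hcond
  have hg : pvG i = (k : Int) := by
    rw [pvG, hlen]
    congr 1
    omega
  rw [Finset.mem_Icc, hg, pvK_eq end_ h]
  constructor
  · exact_mod_cast hk1
  · -- i ≥ 10^(2k-1) and i ≤ end_ < 10^Le gives 2k - 1 < Le, so k ≤ (Le + 1) / 2
    set Le := (Nat.digits 10 end_.toNat).length with hLe
    have hend : 0 < end_.toNat := by omega
    have hub := (pvLen_bounds end_.toNat hend).2
    have hendcast : end_ = (end_.toNat : Int) := by omega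
    have hilb : ((10 ^ (2*k - 1) : Nat) : Int) ≤ i := by
      rw [heq]
      have hcast : ((10 ^ (2*k-1) : Nat) : Int) = (10:Int) ^ (2*k-1) := by push_cast; ring
      rw [hcast]
      have hn : ((10:Int) ^ (k-1)) ≤ (n : Int) := by
        have : ((10 ^ (k-1) : Nat) : Int) ≤ (n : Int) := by exact_mod_cast h1
        rw [show ((10 ^ (k-1) : Nat) : Int) = (10:Int)^(k-1) by push_cast; ring] at this
        exact this
      have hsplit : (10:Int) ^ (2*k-1) = 10 ^ (k-1) * 10 ^ k := by
        rw [← pow_add]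
        congr 1
        omega
      have hp1 : (0:Int) < 10 ^ (k-1) := by positivity
      have hp2 : (0:Int) < 10 ^ k := by positivity
      calc (10:Int) ^ (2*k-1) = 10 ^ (k-1) * 10 ^ k := hsplit
        _ ≤ (n : Int) * 10 ^ k := by
            exact mul_le_mul_of_nonneg_right hn (le_of_lt hp2)
        _ ≤ (n : Int) * (10 ^ k + 1) := by
            have hn0 : (0:Int) ≤ (n : Int) := by positivity
            nlinarith
    have hiub : i < ((10 ^ Le : Nat) : Int) := by
      calc i ≤ end_ := he
        _ = (end_.toNat : Int) := hendcast
        _ < ((10 ^ Le : Nat) : Int) := by exact_mod_cast hub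
    have hpowlt : (10:Nat) ^ (2*k - 1) < 10 ^ Le := by
      have : ((10 ^ (2*k-1) : Nat) : Int) < ((10 ^ Le : Nat) : Int) := lt_of_le_of_lt hilb hiub
      exact_mod_cast this
    have hexp : 2*k - 1 < Le := by
      exact (Nat.pow_lt_pow_iff_right (by norm_num)).mp hpowlt
    have : k ≤ (Le + 1) / 2 := by omega
    exact_mod_cast this

theorem pvEmpty (start end_ : Int) (h : end_ < 1) :
    ∑ i ∈ Finset.Icc start end_, (if pvCond i then i else 0) = 0 := by
  apply Finset.sum_eq_zero
  intro i hi
  rw [Finset.mem_Icc] at hi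
  rw [if_neg]
  intro hcond
  obtain ⟨k, n, hk1, h1, h2, heq, -⟩ := (pvCond_iff i).mp hcond
  have hn1 : (1:Int) ≤ (n:Int) := by
    have : (1:Nat) ≤ n := le_trans (Nat.one_le_pow _ _ (by norm_num)) h1
    exact_mod_cast this
  have hp : (0:Int) < 10 ^ k := by positivity
  nlinarith [heq, hi.2]

-- ===== VERDICT (by name: the statement is the Claim_ definition above) =====
theorem count_invalid_spec : Claim_equal_count_invalid := by
  intro start end_ _
  unfold Spec_count_invalid
  rw [pvA_eq_sum]
  by_cases hend : end_ < 1
  · rw [pvEmpty start end_ hend]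
    unfold count_invalid_alt
    rw [if_pos hend]
  · rw [pvB_eq_sum start end_ hend]
    rw [Finset.sum_congr rfl (fun k hk => pvInner_eq_fiber start end_ k (Finset.mem_Icc.mp hk).1)]
    rw [Finset.sum_fiberwise_of_maps_to (pvMapsTo start end_ hend) (fun i => i)]
    rw [Finset.sum_filter]
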